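-- pv_equiv track=rewrite | github.com/stefanbuettner/adventofcode | 2023/12/solve.py | generate_zeros_ones
-- ===== SOURCE A (Python) =====
-- def next_ones_zeros(s : str):
--     """
--     0000111
--     0001011
--     0001101
--     0001110
--     0010011
--     0010101
--     0010110
--     0011001
--     0011010
--     ...
--     1110000
--     """
--     #s = "".join(l)
--     sr = "".join(reversed(s))
--     first_10 = sr.find("10")
--     if first_10 < 0:
--         # We got the last combination as input
--         return s
--     last_01 = len(s) - first_10 - 2
--     next_l = s[0:last_01] + "10"
--     if s.count("1", last_01) - 1 > 0:
--         trailing_zeros = s.count("0", last_01) - 1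
--         next_l += "0" * trailing_zeros
--         next_l += "1" * (len(s) - last_01 - 2 - trailing_zeros)
--     else:
--         next_l += s[last_01 + 2:]
--     return next_l
--
-- def generate_zeros_ones(k_zeros, n_ones):
--     v = "0" * k_zeros + "1" * n_ones
--     yield v
--     w = next_ones_zeros(v)
--     while w != v:
--         yield w
--         v = w
--         w = next_ones_zeros(v)
--     return
-- ===== SOURCE B (Python) =====
-- def generate_zeros_ones(k_zeros, n_ones):
--     # iterative DFS over the prefix tree: '0' branch explored before '1' branch
--     stack = [("", k_zeros, n_ones)]
--     while stack:
--         prefix, k, n = stack.pop()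
--         if k <= 0 and n <= 0:
--             yield prefix
--         elif k <= 0:
--             yield prefix + "1" * n
--         elif n <= 0:
--             yield prefix + "0" * k
--         else:
--             stack.append((prefix + "1", k, n - 1))
--             stack.append((prefix + "0", k - 1, n))
--     return
-- ===== Notes on version B (the rewrite author's own statement) =====
-- stated objective: simpler
-- what changed: A repeatedly rescans the previous string (reverse, find('10'), counts) to compute its lexicographic successor until a fixpoint; B never computes successors: it runs an explicit-stack DFS over the prefix tree ('0' branch before '1' branch), emitting each string once.
import Mathlib
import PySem

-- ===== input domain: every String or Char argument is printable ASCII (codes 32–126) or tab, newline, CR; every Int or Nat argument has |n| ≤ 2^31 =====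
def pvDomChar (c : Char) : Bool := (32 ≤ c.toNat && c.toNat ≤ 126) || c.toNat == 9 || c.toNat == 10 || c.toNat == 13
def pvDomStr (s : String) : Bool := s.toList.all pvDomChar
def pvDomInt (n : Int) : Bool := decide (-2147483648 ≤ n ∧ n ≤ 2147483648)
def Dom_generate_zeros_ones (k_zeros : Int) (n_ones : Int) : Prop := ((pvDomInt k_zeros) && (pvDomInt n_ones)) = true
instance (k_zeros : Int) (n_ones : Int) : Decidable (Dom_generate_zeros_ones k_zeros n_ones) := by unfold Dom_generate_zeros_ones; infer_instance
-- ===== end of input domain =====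

-- B replaces A's repeat-the-successor-function loop by a short recursive generator
-- ('0'-prefixed block first, then '1'-prefixed block); objective: simpler, same output.
-- A is a Python generator; both ports return the list of yielded strings.

-- ===== PORT A =====
-- next_ones_zeros, transliterated on the code-point list of the string
-- ("".join(reversed(s)) is the reversed char list; s.count(c, last_01) is the
-- count on the slice s[last_01:], which is exact).
def pvNext (s : List Char) : List Char :=
  let sr := s.reverse
  let first_10 := PySem.Chars.find sr ['1', '0']
  if first_10 < 0 then s
  else
    let last_01 : Int := (s.length : Int) - first_10 - 2
    let next_l := PySem.List.slice s (some 0) (some last_01) ++ ['1', '0']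
    if (PySem.Chars.count (PySem.List.slice s (some last_01) none) ['1'] : Int) - 1 > 0 then
      let trailing_zeros : Int := (PySem.Chars.count (PySem.List.slice s (some last_01) none) ['0'] : Int) - 1
      next_l ++ PySem.List.pyRepeat ['0'] trailing_zeros
             ++ PySem.List.pyRepeat ['1'] ((s.length : Int) - last_01 - 2 - trailing_zeros)
    else
      next_l ++ PySem.List.slice s (some (last_01 + 2)) none

-- termination support for the while-loop of A: pvNext strictly increases the
-- binary value of the string (bit 1 at '1') while preserving its length.
def pvVal : List Char → Nat
  | [] => 0
  | c :: r => (if c = '1' then 1 else 0) * 2 ^ r.length + pvVal r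

theorem pvVal_lt (l : List Char) : pvVal l < 2 ^ l.length := by
  induction l with
  | nil => simp [pvVal]
  | cons c r ih =>
    simp only [pvVal, List.length_cons, pow_succ]
    split <;> omega

theorem pvVal_append (u w : List Char) :
    pvVal (u ++ w) = pvVal u * 2 ^ w.length + pvVal w := by
  induction u with
  | nil => simp [pvVal]
  | cons c r ih =>
    simp only [List.cons_append, pvVal, List.length_append, ih]
    rw [pow_add]
    ring

theorem pvNext_of_neg (s : List Char)
    (h : PySem.Chars.find s.reverse ['1', '0'] < 0) : pvNext s = s := by
  simp only [pvNext]
  rw [if_pos h]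

theorem pvCountGo_single (c : Char) (l : List Char) :
    ∀ fuel acc, l.length ≤ fuel →
      PySem.Chars.count.go [c] fuel l acc = acc + l.count c := by
  induction l with
  | nil => intro fuel acc h; cases fuel <;> simp [PySem.Chars.count.go]
  | cons a t ih =>
    intro fuel acc h
    cases fuel with
    | zero => simp at h
    | succ f =>
      rw [PySem.Chars.count.go.eq_def]
      simp only [List.isPrefixOf, List.length_singleton, List.drop_succ_cons, List.drop_zero,
        Bool.and_true]
      by_cases hac : c = a
      · rw [if_pos (by simp [hac]), ih f (acc + 1) (by simpa using h)]
        simp [hac]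
        omega
      · rw [if_neg (by simp [hac]), ih f acc (by simpa using h)]
        simp [Ne.symm hac]

theorem pvCount_single (l : List Char) (c : Char) :
    PySem.Chars.count l [c] = l.count c := by
  have he : ([c] : List Char).isEmpty = false := rfl
  simp only [PySem.Chars.count, he, Bool.false_eq_true, if_false]
  simpa using pvCountGo_single c l l.length 0 le_rfl

-- the master computation: when the reversed string contains "10", the input
-- splits (uniquely) around its last adjacent "01" and pvNext rebuilds it.
theorem pvNext_find_pos (s : List Char)
    (h : ¬ PySem.Chars.find s.reverse ['1', '0'] < 0) :
    ∃ p t, s = p ++ '0' :: '1' :: t ∧ (∀ q r, t ≠ q ++ '0' :: '1' :: r) ∧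
      pvNext s = p ++ '1' :: '0' ::
        (if 0 < t.count '1' then
          List.replicate (t.count '0') '0' ++ List.replicate (t.length - t.count '0') '1'
         else t) := by
  have h0 : 0 ≤ PySem.Chars.find s.reverse ['1', '0'] := by omega
  obtain ⟨hpre, hmin⟩ := PySem.Chars.find_spec h0
  set f := (PySem.Chars.find s.reverse ['1', '0']).toNat with hfdef
  obtain ⟨c, hc⟩ : ∃ c, s.reverse.drop f = '1' :: '0' :: c := by
    obtain ⟨u, hu⟩ := hpre
    exact ⟨u, hu.symm⟩
  have hsplit : s.reverse = s.reverse.take f ++ '1' :: '0' :: c := by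
    rw [← hc, List.take_append_drop]
  have hfle : f + 2 ≤ s.length := by
    have := congrArg List.length hc
    simp at this
    omega
  have htake_len : (s.reverse.take f).length = f := by simp; omega
  set p := c.reverse with hpdef
  set t := (s.reverse.take f).reverse with htdef
  have ht_len : t.length = f := by simp [htdef, htake_len]
  have hs : s = p ++ '0' :: '1' :: t := by
    have h1 : s = (s.reverse.take f ++ '1' :: '0' :: c).reverse := by
      rw [← hsplit, List.reverse_reverse]
    rw [h1]
    simp [htdef, hpdef]
  have hplen : s.length = p.length + 2 + t.length := by
    rw [hs]; simp; omega
  have hF : PySem.Chars.find s.reverse ['1', '0'] = (t.length : Int) := by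
    rw [ht_len, hfdef, Int.toNat_of_nonneg h0]
  refine ⟨p, t, hs, ?_, ?_⟩
  · intro q r hqr
    have htr : s.reverse.take f = r.reverse ++ '1' :: '0' :: q.reverse := by
      have : t.reverse = s.reverse.take f := by simp [htdef]
      rw [← this, hqr]
      simp
    have hdropr : ['1', '0'] <+: s.reverse.drop r.length := by
      rw [hsplit, htr]
      have : (r.reverse ++ '1' :: '0' :: q.reverse ++ '1' :: '0' :: c).drop r.length
           = '1' :: '0' :: (q.reverse ++ '1' :: '0' :: c) := by
        rw [List.append_assoc]
        have h2 : r.length = r.reverse.length := by simp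
        rw [h2, List.drop_left]
        simp
      simpa [List.append_assoc] using this ▸ (⟨q.reverse ++ '1' :: '0' :: c, rfl⟩ : ['1','0'] <+: '1' :: '0' :: (q.reverse ++ '1' :: '0' :: c))
    have hrlt : r.length < f := by
      have := congrArg List.length hqr
      simp at this
      omega
    exact hmin r.length hrlt hdropr
  · -- computation
    have hlast : (s.length : Int) - (t.length : Int) - 2 = (p.length : Int) := by
      push_cast [hplen]; omega
    have hslice1 : PySem.List.slice s (some ((p.length : Nat) : Int)) none = '0' :: '1' :: t := by
      rw [PySem.List.slice_from_natCast, hs, List.drop_left]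
    have hslice0 : PySem.List.slice s (some 0) (some ((p.length : Nat) : Int)) = p := by
      rw [PySem.List.slice_zero_start, PySem.List.slice_to_natCast, hs, List.take_left]
    have hcount1 : ('0' :: '1' :: t).count '1' = t.count '1' + 1 := by
      simp
    have hcount0 : ('0' :: '1' :: t).count '0' = t.count '0' + 1 := by
      simp
    have hc0le : t.count '0' ≤ t.length := List.count_le_length
    simp only [pvNext]
    rw [if_neg h, hF, hlast, hslice1, hslice0, pvCount_single, hcount1]
    by_cases hb : 0 < t.count '1'
    · rw [if_pos (by push_cast; omega), if_pos hb, pvCount_single, hcount0]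
      rw [PySem.List.pyRepeat_singleton, PySem.List.pyRepeat_singleton]
      have e1 : ((t.count '0' + 1 : Nat) : Int) - 1 = ((t.count '0' : Nat) : Int) := by push_cast; omega
      rw [e1, Int.toNat_natCast]
      have e2 : (s.length : Int) - (p.length : Int) - 2 - ((t.count '0' : Nat) : Int)
              = ((t.length - t.count '0' : Nat) : Int) := by
        push_cast [hplen, Nat.cast_sub hc0le]; omega
      rw [e2, Int.toNat_natCast]
      simp [List.append_assoc]
    · rw [if_neg (by push_cast; omega), if_neg hb]
      have e3 : ((p.length : Nat) : Int) + 2 = ((p.length + 2 : Nat) : Int) := by push_cast; ring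
      rw [e3, PySem.List.slice_from_natCast]
      rw [hs]
      have hsplit2 : p ++ '0' :: '1' :: t = (p ++ ['0', '1']) ++ t := by simp
      have hlen2 : p.length + 2 = (p ++ ['0', '1']).length := by simp
      rw [hsplit2, hlen2, List.drop_left]
      simp [List.append_assoc]

theorem pvNext_progress (s : List Char) (h : pvNext s ≠ s) :
    (pvNext s).length = s.length ∧ pvVal s < pvVal (pvNext s) := by
  by_cases hneg : PySem.Chars.find s.reverse ['1', '0'] < 0
  · exact absurd (pvNext_of_neg s hneg) h
  · obtain ⟨p, t, hs, _, hnext⟩ := pvNext_find_pos s hneg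
    have hc0le : t.count '0' ≤ t.length := List.count_le_length
    set X := (if 0 < t.count '1' then
        List.replicate (t.count '0') '0' ++ List.replicate (t.length - t.count '0') '1'
       else t) with hXdef
    have hXlen : X.length = t.length := by
      rw [hXdef]
      split
      · simp; omega
      · rfl
    constructor
    · rw [hnext, hs]
      simp [hXlen]
    · rw [hnext, hs, pvVal_append, pvVal_append]
      have hlen2 : ('1' :: '0' :: X).length = ('0' :: '1' :: t).length := by simp [hXlen]
      rw [hlen2]
      have hvt : pvVal ('0' :: '1' :: t) = 2 ^ t.length + pvVal t := by simp [pvVal]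
      have hvX : 2 ^ t.length * 2 ≤ pvVal ('1' :: '0' :: X) := by
        simp [pvVal, hXlen, pow_succ]
      have hlt := pvVal_lt t
      rw [hvt]
      omega

-- the generator: yield v, then successors until the fixpoint
def pvLoop (v : List Char) : List String :=
  let w := pvNext v
  if _h : w = v then [String.ofList v]
  else String.ofList v :: pvLoop w
termination_by 2 ^ v.length - pvVal v
decreasing_by
  have hp := pvNext_progress v _h
  have hlt := pvVal_lt (pvNext v)
  rw [hp.1] at hlt
  rw [hp.1]
  omega

def generate_zeros_ones (k_zeros : Int) (n_ones : Int) : List String :=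
  pvLoop (PySem.List.pyRepeat ['0'] k_zeros ++ PySem.List.pyRepeat ['1'] n_ones)

-- ===== PORT B =====
-- the DFS stack of B: entries (prefix, k, n), top of stack at the head
theorem pvStackMeasure (a b : Nat) (ha : 0 < a) (hb : 0 < b) (S : Nat) :
    3 ^ (a - 1 + b) + (3 ^ (a + (b - 1)) + S) < 3 ^ (a + b) + S := by
  have h1 : a - 1 + b = a + b - 1 := by omega
  have h2 : a + (b - 1) = a + b - 1 := by omega
  have h3 : 3 ^ (a + b) = 3 ^ (a + b - 1) * 3 := by
    rw [← pow_succ, show (a + b - 1) + 1 = a + b by omega]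
  have h4 : 0 < 3 ^ (a + b - 1) := Nat.pow_pos (by omega)
  rw [h1, h2, h3]
  omega

def pvStackLoop : List (List Char × Int × Int) → List String
  | [] => []
  | (p, k, n) :: rest =>
    if k ≤ 0 ∧ n ≤ 0 then String.ofList p :: pvStackLoop rest
    else if k ≤ 0 then
      String.ofList (p ++ PySem.List.pyRepeat ['1'] n) :: pvStackLoop rest
    else if n ≤ 0 then
      String.ofList (p ++ PySem.List.pyRepeat ['0'] k) :: pvStackLoop rest
    else pvStackLoop ((p ++ ['0'], k - 1, n) :: (p ++ ['1'], k, n - 1) :: rest)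
termination_by st => (st.map (fun e => 3 ^ (e.2.1.toNat + e.2.2.toNat))).sum
decreasing_by
  all_goals simp_all
  exact pvStackMeasure k.toNat n.toNat (by omega) (by omega) _

def generate_zeros_ones_alt (k_zeros : Int) (n_ones : Int) : List String :=
  pvStackLoop [([], k_zeros, n_ones)]

-- ===== PRECONDITION & SPEC =====
def Spec_generate_zeros_ones (k_zeros : Int) (n_ones : Int) (out : List String) : Prop := out = generate_zeros_ones_alt k_zeros n_ones
instance (k_zeros : Int) (n_ones : Int) (out : List String) : Decidable (Spec_generate_zeros_ones k_zeros n_ones out) := by unfold Spec_generate_zeros_ones; infer_instance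

-- ===== CLAIM (what is proved, stated in full; the proofs are below) =====
def Claim_equal_generate_zeros_ones : Prop := ∀ (k_zeros : Int) (n_ones : Int), Dom_generate_zeros_ones k_zeros n_ones → Spec_generate_zeros_ones k_zeros n_ones (generate_zeros_ones k_zeros n_ones)

-- ===== LEMMAS AND PROOFS =====

-- proof helper: the block of outputs contributed by one stack entry, as a
-- two-way recursion on the counts
def pvGen (k_zeros : Int) (n_ones : Int) : List String :=
  if k_zeros ≤ 0 ∧ n_ones ≤ 0 then [""]
  else if k_zeros ≤ 0 then [String.ofList (PySem.List.pyRepeat ['1'] n_ones)]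
  else if n_ones ≤ 0 then [String.ofList (PySem.List.pyRepeat ['0'] k_zeros)]
  else (pvGen (k_zeros - 1) n_ones).map (fun s => String.ofList ('0' :: s.toList))
    ++ (pvGen k_zeros (n_ones - 1)).map (fun s => String.ofList ('1' :: s.toList))
termination_by (k_zeros.toNat + n_ones.toNat)
decreasing_by all_goals omega

theorem pvStack_sum_pos (p : List Char) (k n : Int)
    (rest : List (List Char × Int × Int)) :
    0 < (((p, k, n) :: rest).map (fun e => 3 ^ (e.2.1.toNat + e.2.2.toNat))).sum := by
  have : 0 < 3 ^ (k.toNat + n.toNat) := Nat.pow_pos (by omega)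
  simp only [List.map_cons, List.sum_cons]
  omega

theorem pvStack_eq_aux (M : Nat) : ∀ st : List (List Char × Int × Int),
    (st.map (fun e => 3 ^ (e.2.1.toNat + e.2.2.toNat))).sum ≤ M →
    pvStackLoop st = (st.map (fun e =>
      (pvGen e.2.1 e.2.2).map (fun r => String.ofList (e.1 ++ r.toList)))).flatten := by
  induction M with
  | zero =>
    intro st hle
    cases st with
    | nil => simp [pvStackLoop]
    | cons e rest =>
      obtain ⟨p, k, n⟩ := e
      have := pvStack_sum_pos p k n rest
      omega
  | succ M ih =>
    intro st hle
    cases st with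
    | nil => simp [pvStackLoop]
    | cons e rest =>
      obtain ⟨p, k, n⟩ := e
      have hpow : 0 < 3 ^ (k.toNat + n.toNat) := Nat.pow_pos (by omega)
      have hsum : (((p, k, n) :: rest).map (fun e => 3 ^ (e.2.1.toNat + e.2.2.toNat))).sum
          = 3 ^ (k.toNat + n.toNat)
            + (rest.map (fun e => 3 ^ (e.2.1.toNat + e.2.2.toNat))).sum := by
        simp
      have hrest : (rest.map (fun e => 3 ^ (e.2.1.toNat + e.2.2.toNat))).sum ≤ M := by
        rw [hsum] at hle; omega
      by_cases h1 : k ≤ 0 ∧ n ≤ 0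
      · have hg : pvGen k n = [""] := by rw [pvGen, if_pos h1]
        rw [pvStackLoop, if_pos h1, ih rest hrest]
        simp [hg]
      · by_cases h2 : k ≤ 0
        · have hg : pvGen k n = [String.ofList (PySem.List.pyRepeat ['1'] n)] := by
            rw [pvGen, if_neg h1, if_pos h2]
          rw [pvStackLoop, if_neg h1, if_pos h2, ih rest hrest]
          simp [hg]
        · by_cases h3 : n ≤ 0
          · have hg : pvGen k n = [String.ofList (PySem.List.pyRepeat ['0'] k)] := by
              rw [pvGen, if_neg h1, if_neg h2, if_pos h3]
            rw [pvStackLoop, if_neg h1, if_neg h2, if_pos h3, ih rest hrest]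
            simp [hg]
          · have hm := pvStackMeasure k.toNat n.toNat (by omega) (by omega)
              ((rest.map (fun e => 3 ^ (e.2.1.toNat + e.2.2.toNat))).sum)
            have hle2 : ((((p ++ ['0'], k - 1, n) :: (p ++ ['1'], k, n - 1) :: rest)).map
                (fun e => 3 ^ (e.2.1.toNat + e.2.2.toNat))).sum ≤ M := by
              simp only [List.map_cons, List.sum_cons]
              rw [hsum] at hle
              have e1 : (k - 1).toNat = k.toNat - 1 := by omega
              have e2 : (n - 1).toNat = n.toNat - 1 := by omega
              rw [e1, e2]
              omega
            have hg : pvGen k n =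
                (pvGen (k - 1) n).map (fun s => String.ofList ('0' :: s.toList))
                  ++ (pvGen k (n - 1)).map (fun s => String.ofList ('1' :: s.toList)) := by
              rw [pvGen, if_neg h1, if_neg h2, if_neg h3]
            have hc : ∀ (c : Char) (r : String),
                String.ofList (c :: r.toList) = String.ofList [c] ++ r := by
              intro c r
              rw [show (c :: r.toList) = [c] ++ r.toList from rfl,
                String.ofList_append, String.ofList_toList]
            rw [pvStackLoop, if_neg h1, if_neg h2, if_neg h3, ih _ hle2]
            simp [hg, hc, Function.comp_def, List.append_assoc, String.append_assoc]

theorem pvStack_eq (st : List (List Char × Int × Int)) :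
    pvStackLoop st = (st.map (fun e =>
      (pvGen e.2.1 e.2.2).map (fun r => String.ofList (e.1 ++ r.toList)))).flatten :=
  pvStack_eq_aux _ st le_rfl

theorem pvAlt_eq_pvGen (k n : Int) : generate_zeros_ones_alt k n = pvGen k n := by
  rw [generate_zeros_ones_alt, pvStack_eq]
  simp


theorem pvLoop_eq (v : List Char) :
    pvLoop v = if pvNext v = v then [String.ofList v]
               else String.ofList v :: pvLoop (pvNext v) := by
  rw [pvLoop]
  simp only [dite_eq_ite]

-- "s contains an adjacent '0','1' pair"
def pvHas01 : List Char → Bool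
  | c0 :: c1 :: r => (c0 == '0' && c1 == '1') || pvHas01 (c1 :: r)
  | _ => false

theorem pvHas01_iff (l : List Char) :
    pvHas01 l = true ↔ ∃ p t, l = p ++ '0' :: '1' :: t := by
  induction l with
  | nil => simp [pvHas01]
  | cons c0 r ih =>
    cases r with
    | nil =>
      simp only [pvHas01]
      constructor
      · intro h; simp at h
      · rintro ⟨p, t, hp⟩
        rcases p with _ | ⟨a, p⟩ <;> simp_all
    | cons c1 r2 =>
      simp only [pvHas01, Bool.or_eq_true, Bool.and_eq_true, beq_iff_eq, ih]
      constructor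
      · rintro (⟨h0, h1⟩ | ⟨p, t, hp⟩)
        · exact ⟨[], r2, by simp [h0, h1]⟩
        · exact ⟨c0 :: p, t, by simp [hp]⟩
      · rintro ⟨p, t, hp⟩
        rcases p with _ | ⟨a, p⟩
        · simp at hp; exact Or.inl ⟨hp.1, hp.2.1⟩
        · simp at hp; exact Or.inr ⟨p, t, by simp [hp]⟩

theorem pvHas01_tail (c : Char) (l : List Char) (h : pvHas01 (c :: l) = false) :
    pvHas01 l = false := by
  cases l with
  | nil => rfl
  | cons a t => simp only [pvHas01, Bool.or_eq_false_iff] at h; exact h.2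

theorem pvHas01_decomp (l : List Char) (h : pvHas01 l = true) :
    ∃ p t, l = p ++ '0' :: '1' :: t ∧ pvHas01 t = false := by
  induction l with
  | nil => simp [pvHas01] at h
  | cons c0 r ih =>
    by_cases hr : pvHas01 r = true
    · obtain ⟨p, t, hp, ht⟩ := ih hr
      exact ⟨c0 :: p, t, by simp [hp], ht⟩
    · cases r with
      | nil => simp [pvHas01] at h
      | cons c1 r2 =>
        simp only [pvHas01, Bool.or_eq_true, Bool.and_eq_true, beq_iff_eq] at h
        rcases h with ⟨h0, h1⟩ | h2
        · exact ⟨[], r2, by simp [h0, h1],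
            pvHas01_tail c1 r2 (by simpa using hr)⟩
        · exact absurd h2 hr

theorem pvNoPat_iff (t : List Char) :
    (∀ q r, t ≠ q ++ '0' :: '1' :: r) ↔ pvHas01 t = false := by
  rw [← Bool.not_eq_true, pvHas01_iff]
  push Not
  simp

theorem pvDecompUnique_aux (p₁ t₁ p₂ t₂ : List Char)
    (h : p₁ ++ '0' :: '1' :: t₁ = p₂ ++ '0' :: '1' :: t₂)
    (h2 : pvHas01 t₂ = false) (hlt : t₁.length < t₂.length) : False := by
  have hs1 : ('0' :: '1' :: t₁) <:+ (p₂ ++ '0' :: '1' :: t₂) := ⟨p₁, h⟩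
  have hs2 : ('0' :: '1' :: t₂) <:+ (p₂ ++ '0' :: '1' :: t₂) := ⟨p₂, rfl⟩
  have hsuf : ('0' :: '1' :: t₁) <:+ ('0' :: '1' :: t₂) :=
    List.suffix_of_suffix_length_le hs1 hs2 (by simp; omega)
  rw [List.suffix_cons_iff] at hsuf
  rcases hsuf with heq | hsuf
  · have := congrArg List.length heq; simp at this; omega
  rw [List.suffix_cons_iff] at hsuf
  rcases hsuf with heq | hsuf
  · simp at heq
  obtain ⟨q, hq⟩ := hsuf
  have : pvHas01 t₂ = true := (pvHas01_iff t₂).2 ⟨q, t₁, hq.symm⟩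
  simp_all

theorem pvDecompUnique (p₁ t₁ p₂ t₂ : List Char)
    (h : p₁ ++ '0' :: '1' :: t₁ = p₂ ++ '0' :: '1' :: t₂)
    (h1 : pvHas01 t₁ = false) (h2 : pvHas01 t₂ = false) : p₁ = p₂ ∧ t₁ = t₂ := by
  rcases Nat.lt_trichotomy t₁.length t₂.length with hlt | heq | hgt
  · exact absurd (pvDecompUnique_aux p₁ t₁ p₂ t₂ h h2 hlt) (by simp)
  · have hp : p₁.length = p₂.length := by
      have := congrArg List.length h; simp at this; omega
    obtain ⟨hpe, hte⟩ := List.append_inj h hp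
    simp at hte
    exact ⟨hpe, hte⟩
  · exact absurd (pvDecompUnique_aux p₂ t₂ p₁ t₁ h.symm h1 hgt) (by simp)

theorem pvNext_decomp (p t : List Char) (ht : pvHas01 t = false) :
    pvNext (p ++ '0' :: '1' :: t) = p ++ '1' :: '0' ::
      (if 0 < t.count '1' then
        List.replicate (t.count '0') '0' ++ List.replicate (t.length - t.count '0') '1'
       else t) := by
  have hinf : (['1', '0'] : List Char) <:+: (p ++ '0' :: '1' :: t).reverse := by
    refine ⟨t.reverse, p.reverse, ?_⟩
    simp
  have hpos : ¬ PySem.Chars.find (p ++ '0' :: '1' :: t).reverse ['1', '0'] < 0 := by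
    have := (PySem.Chars.find_nonneg_iff _ _).2 hinf
    omega
  obtain ⟨p', t', hs', hnp', hnext⟩ := pvNext_find_pos _ hpos
  have ht' : pvHas01 t' = false := (pvNoPat_iff t').1 hnp'
  obtain ⟨hpe, hte⟩ := pvDecompUnique p t p' t' hs' ht ht'
  rw [hnext, ← hpe, ← hte]

theorem pvNext_fix (s : List Char) (h : pvHas01 s = false) : pvNext s = s := by
  apply pvNext_of_neg
  by_contra h'
  obtain ⟨u, v, huv⟩ := (PySem.Chars.find_nonneg_iff s.reverse ['1', '0']).1 (by omega)
  have hsv : s = v.reverse ++ '0' :: '1' :: u.reverse := by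
    have : s = (u ++ ['1', '0'] ++ v).reverse := by rw [huv, List.reverse_reverse]
    rw [this]; simp
  have := (pvHas01_iff s).2 ⟨v.reverse, u.reverse, hsv⟩
  rw [h] at this
  exact Bool.false_ne_true this

theorem pvNext_ne (s : List Char) (h : pvHas01 s = true) : pvNext s ≠ s := by
  obtain ⟨p, t, hs, ht⟩ := pvHas01_decomp s h
  rw [hs, pvNext_decomp p t ht]
  intro heq
  have := List.append_cancel_left heq
  simp at this

theorem pvHas01_of_fix (s : List Char) (h : pvNext s = s) : pvHas01 s = false := by
  by_contra hb
  exact pvNext_ne s (by simpa using hb) h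

theorem pvHas01_cons_one (s : List Char) : pvHas01 ('1' :: s) = pvHas01 s := by
  cases s with
  | nil => rfl
  | cons a t => simp [pvHas01]

theorem pvNext_cons (c : Char) (s : List Char) (h : pvHas01 s = true) :
    pvNext (c :: s) = c :: pvNext s := by
  obtain ⟨p, t, hs, ht⟩ := pvHas01_decomp s h
  rw [hs]
  have : c :: (p ++ '0' :: '1' :: t) = (c :: p) ++ '0' :: '1' :: t := by simp
  rw [this, pvNext_decomp (c :: p) t ht, pvNext_decomp p t ht]
  simp

theorem pvHas01_rep0 (m : Nat) : pvHas01 (List.replicate m '0') = false := by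
  induction m with
  | zero => rfl
  | succ n ih =>
    cases n with
    | zero => rfl
    | succ n2 => simpa [List.replicate_succ, pvHas01] using ih

theorem pvHas01_ones_zeros (x y : Nat) :
    pvHas01 (List.replicate x '1' ++ List.replicate y '0') = false := by
  induction x with
  | zero => simpa using pvHas01_rep0 y
  | succ n ih => simpa [List.replicate_succ, pvHas01_cons_one] using ih

theorem pvCount01_len (t : List Char) (h : ∀ x ∈ t, x = '0' ∨ x = '1') :
    t.count '0' + t.count '1' = t.length := by
  induction t with
  | nil => simp
  | cons a t ih =>
    have ha := h a (by simp)
    have := ih (fun x hx => h x (by simp [hx]))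
    rcases ha with h0 | h1 <;> subst a <;> simp <;> omega

theorem pvNo01_shape (s : List Char) (hc : ∀ x ∈ s, x = '0' ∨ x = '1')
    (h : pvHas01 s = false) :
    s = List.replicate (s.count '1') '1' ++ List.replicate (s.count '0') '0' := by
  induction s with
  | nil => simp
  | cons a r ih =>
    have ha := hc a List.mem_cons_self
    have hrr := ih (fun x hx => hc x (List.mem_cons_of_mem a hx)) (pvHas01_tail a r h)
    rcases ha with h0 | h1
    · subst h0
      have hr1 : r.count '1' = 0 := by
        by_contra hb
        obtain ⟨m, hm⟩ : ∃ m, r.count '1' = m + 1 := ⟨r.count '1' - 1, by omega⟩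
        rw [hm, List.replicate_succ] at hrr
        rw [hrr] at h
        simp [pvHas01] at h
      rw [hr1] at hrr
      simp at hrr
      rw [List.count_cons_self, List.count_cons_of_ne (by decide)]
      rw [hr1, List.replicate_succ]
      simp
      conv_lhs => rw [hrr]
    · subst h1
      rw [List.count_cons_self, List.count_cons_of_ne (by decide), List.replicate_succ]
      simp
      conv_lhs => rw [hrr]

theorem pvNext_comb (s : List Char) (hc : ∀ x ∈ s, x = '0' ∨ x = '1')
    (h : pvHas01 s = true) :
    (∀ x ∈ pvNext s, x = '0' ∨ x = '1') ∧
      (pvNext s).count '0' = s.count '0' ∧ (pvNext s).count '1' = s.count '1' := by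
  obtain ⟨p, t, hs, ht⟩ := pvHas01_decomp s h
  have hct : ∀ x ∈ t, x = '0' ∨ x = '1' := by
    intro x hx; exact hc x (by rw [hs]; simp [hx])
  have hcp : ∀ x ∈ p, x = '0' ∨ x = '1' := by
    intro x hx; exact hc x (by rw [hs]; simp [hx])
  have hlen01 := pvCount01_len t hct
  rw [hs, pvNext_decomp p t ht]
  by_cases hb : 0 < t.count '1'
  · rw [if_pos hb]
    refine ⟨?_, ?_, ?_⟩
    · intro x hx
      simp only [List.mem_append, List.mem_cons, List.mem_replicate] at hx
      rcases hx with hx | hx | hx | ⟨_, hx⟩ | ⟨_, hx⟩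
      · exact hcp x hx
      · exact Or.inr hx
      · exact Or.inl hx
      · exact Or.inl hx
      · exact Or.inr hx
    · simp [List.count_replicate]
    · simp [List.count_replicate]
      omega
  · rw [if_neg hb]
    refine ⟨?_, ?_, ?_⟩
    · intro x hx
      simp only [List.mem_append, List.mem_cons] at hx
      rcases hx with hx | hx | hx | hx
      · exact hcp x hx
      · exact Or.inr hx
      · exact Or.inl hx
      · exact hct x hx
    · simp
    · simp

theorem pvMeasure_dec (s : List Char) (h : pvNext s ≠ s) :
    2 ^ (pvNext s).length - pvVal (pvNext s) < 2 ^ s.length - pvVal s := by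
  have hp := pvNext_progress s h
  have hlt := pvVal_lt s
  rw [hp.1]
  omega

theorem pvL1 (s : List Char) :
    pvLoop ('1' :: s) = (pvLoop s).map (fun r => String.ofList ('1' :: r.toList)) := by
  suffices haux : ∀ N s, 2 ^ s.length - pvVal s ≤ N →
      pvLoop ('1' :: s) = (pvLoop s).map (fun r => String.ofList ('1' :: r.toList)) from
    haux _ s le_rfl
  intro N
  induction N with
  | zero => intro s hle; have := pvVal_lt s; omega
  | succ n ih =>
    intro s hle
    by_cases hfix : pvNext s = s
    · have h01 : pvHas01 s = false := pvHas01_of_fix s hfix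
      have h01' : pvHas01 ('1' :: s) = false := by rw [pvHas01_cons_one]; exact h01
      rw [pvLoop_eq ('1' :: s), if_pos (pvNext_fix _ h01'), pvLoop_eq s, if_pos hfix]
      simp
    · have h01 : pvHas01 s = true := by
        by_contra hb
        exact hfix (pvNext_fix s (by simpa using hb))
      have hcons := pvNext_cons '1' s h01
      have hne : pvNext ('1' :: s) ≠ '1' :: s := by
        rw [hcons]
        intro he
        simp at he
        exact hfix he
      rw [pvLoop_eq ('1' :: s), if_neg hne, hcons, pvLoop_eq s, if_neg hfix]
      have hdec := pvMeasure_dec s hfix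
      rw [ih (pvNext s) (by omega)]
      simp

theorem pvL0 (z o : Nat) (s : List Char) (hc : ∀ x ∈ s, x = '0' ∨ x = '1')
    (hz : s.count '0' = z) (ho : s.count '1' = o) (hpos : 0 < o) :
    pvLoop ('0' :: s) = (pvLoop s).map (fun r => String.ofList ('0' :: r.toList)) ++
      pvLoop ('1' :: (List.replicate (z + 1) '0' ++ List.replicate (o - 1) '1')) := by
  suffices haux : ∀ N s, 2 ^ s.length - pvVal s ≤ N → (∀ x ∈ s, x = '0' ∨ x = '1') →
      s.count '0' = z → s.count '1' = o →
      pvLoop ('0' :: s) = (pvLoop s).map (fun r => String.ofList ('0' :: r.toList)) ++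
        pvLoop ('1' :: (List.replicate (z + 1) '0' ++ List.replicate (o - 1) '1')) from
    haux _ s le_rfl hc hz ho
  intro N
  induction N with
  | zero => intro s hle _ _ _; have := pvVal_lt s; omega
  | succ n ih =>
    intro s hle hc hz ho
    by_cases hfix : pvNext s = s
    · have h01 : pvHas01 s = false := pvHas01_of_fix s hfix
      have hshape := pvNo01_shape s hc h01
      rw [hz, ho] at hshape
      obtain ⟨o', rfl⟩ : ∃ o', o = o' + 1 := ⟨o - 1, by omega⟩
      have hsplit : '0' :: s =
          [] ++ '0' :: '1' :: (List.replicate o' '1' ++ List.replicate z '0') := by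
        rw [hshape]
        simp [List.replicate_succ]
      have ht01 := pvHas01_ones_zeros o' z
      have hnx : pvNext ('0' :: s) =
          '1' :: (List.replicate (z + 1) '0' ++ List.replicate o' '1') := by
        rw [hsplit, pvNext_decomp [] _ ht01]
        have hc1 : (List.replicate o' '1' ++ List.replicate z '0').count '1' = o' := by
          simp [List.count_replicate]
        have hc0 : (List.replicate o' '1' ++ List.replicate z '0').count '0' = z := by
          simp [List.count_replicate]
        have hl : (List.replicate o' '1' ++ List.replicate z '0').length = o' + z := by
          simp
        rw [hc1, hc0, hl]
        by_cases hb : 0 < o'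
        · rw [if_pos hb]
          have : o' + z - z = o' := by omega
          rw [this]
          simp [List.replicate_succ]
        · rw [if_neg hb]
          have : o' = 0 := by omega
          subst this
          simp [List.replicate_succ]
      have hne : pvNext ('0' :: s) ≠ '0' :: s := by
        rw [hnx]
        intro he
        simp at he
      rw [pvLoop_eq ('0' :: s), if_neg hne, hnx, pvLoop_eq s, if_pos hfix]
      simp
    · have h01 : pvHas01 s = true := by
        by_contra hb
        exact hfix (pvNext_fix s (by simpa using hb))
      have hcons := pvNext_cons '0' s h01
      have hne : pvNext ('0' :: s) ≠ '0' :: s := by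
        rw [hcons]
        intro he
        simp at he
        exact hfix he
      obtain ⟨hc', hz', ho'⟩ := pvNext_comb s hc h01
      rw [pvLoop_eq ('0' :: s), if_neg hne, hcons, pvLoop_eq s, if_neg hfix]
      have hdec := pvMeasure_dec s hfix
      rw [ih (pvNext s) (by omega) hc' (by rw [hz', hz]) (by rw [ho', ho])]
      simp

theorem pvMain (N : Nat) : ∀ (k n : Int), k.toNat + n.toNat ≤ N →
    pvLoop (List.replicate k.toNat '0' ++ List.replicate n.toNat '1') =
      pvGen k n := by
  induction N with
  | zero =>
    intro k n hle
    have hk : k.toNat = 0 := by omega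
    have hn : n.toNat = 0 := by omega
    rw [pvGen, if_pos ⟨by omega, by omega⟩, hk, hn]
    rw [List.replicate_zero, List.replicate_zero, List.nil_append,
      pvLoop_eq, if_pos (pvNext_fix [] rfl)]
  | succ N ih =>
    intro k n hle
    by_cases hk0 : k ≤ 0
    · by_cases hn0 : n ≤ 0
      · have hk : k.toNat = 0 := by omega
        have hn : n.toNat = 0 := by omega
        rw [pvGen, if_pos ⟨hk0, hn0⟩, hk, hn]
        rw [List.replicate_zero, List.replicate_zero, List.nil_append,
          pvLoop_eq, if_pos (pvNext_fix [] rfl)]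
      · rw [pvGen, if_neg (by tauto), if_pos hk0]
        have hk : k.toNat = 0 := by omega
        rw [hk, List.replicate_zero, List.nil_append]
        have hfix : pvNext (List.replicate n.toNat '1') = List.replicate n.toNat '1' :=
          pvNext_fix _ (by simpa using pvHas01_ones_zeros n.toNat 0)
        rw [pvLoop_eq, if_pos hfix, PySem.List.pyRepeat_singleton]
    · by_cases hn0 : n ≤ 0
      · rw [pvGen, if_neg (by tauto), if_neg hk0, if_pos hn0]
        have hn : n.toNat = 0 := by omega
        rw [hn, List.replicate_zero, List.append_nil]
        have hfix : pvNext (List.replicate k.toNat '0') = List.replicate k.toNat '0' :=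
          pvNext_fix _ (pvHas01_rep0 k.toNat)
        rw [pvLoop_eq, if_pos hfix, PySem.List.pyRepeat_singleton]
      · rw [pvGen, if_neg (by tauto), if_neg hk0, if_neg hn0]
        have hsplit : List.replicate k.toNat '0' = '0' :: List.replicate (k.toNat - 1) '0' := by
          conv_lhs => rw [show k.toNat = (k.toNat - 1) + 1 by omega]
          rw [List.replicate_succ]
        rw [hsplit, List.cons_append]
        rw [pvL0 (k.toNat - 1) n.toNat _
          (by intro x hx; simp [List.mem_replicate] at hx; tauto)
          (by simp [List.count_replicate])
          (by simp [List.count_replicate])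
          (by omega)]
        rw [show k.toNat - 1 + 1 = k.toNat by omega, pvL1]
        have h1 : pvLoop (List.replicate (k.toNat - 1) '0' ++ List.replicate n.toNat '1') =
            pvGen (k - 1) n := by
          have := ih (k - 1) n (by omega)
          rwa [show (k - 1).toNat = k.toNat - 1 by omega] at this
        have h2 : pvLoop (List.replicate k.toNat '0' ++ List.replicate (n.toNat - 1) '1') =
            pvGen k (n - 1) := by
          have := ih k (n - 1) (by omega)
          rwa [show (n - 1).toNat = n.toNat - 1 by omega] at this
        rw [h1, h2]

-- ===== VERDICT (by name: the statement is the Claim_ definition above) =====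
theorem generate_zeros_ones_spec : Claim_equal_generate_zeros_ones := by
  intro k n _dom
  unfold Spec_generate_zeros_ones generate_zeros_ones
  rw [PySem.List.pyRepeat_singleton, PySem.List.pyRepeat_singleton, pvAlt_eq_pvGen]
  exact pvMain (k.toNat + n.toNat) k n le_rfl
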